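-- pv_equiv track=rewrite | github.com/rodfer0x80/aoc2021py | src/day10.py | scan_illegal_chars
-- ===== SOURCE A (Python) =====
-- def scan_illegal_chars(input_ls: list) -> list:
--     illegal_chars = list()
--     for line in input_ls:
--         stack = list()
--         for char in line:
--             gt = char == '>' and len(stack) > 0 and stack[-1] == '<'
--             sq = char == ']' and len(stack) > 0 and stack[-1] == '['
--             cl = char == '}' and len(stack) > 0 and stack[-1] == '{'
--             ci = char == ')' and len(stack) > 0 and stack[-1] == '('
--             if gt or sq or cl or ci:
--                 stack.pop()
--             elif char in ['(', '[', '{', '<']: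
--                 stack.append(char)
--             else:
--                 illegal_chars.append(char)
--                 break
--     return illegal_chars
-- ===== SOURCE B (Python) =====
-- def scan_illegal_chars(input_ls: list) -> list:
--     illegal_chars = []
--     for line in input_ls:
--         reduced = line
--         while True:
--             collapsed = reduced
--             for pair in ("()", "[]", "{}", "<>"):
--                 collapsed = collapsed.replace(pair, "")
--             if collapsed == reduced:
--                 break
--             reduced = collapsed
--         for char in reduced:
--             if char not in "([{<":
--                 illegal_chars.append(char)
--                 break
--     return illegal_chars
-- ===== Notes on version B (the rewrite author's own statement) =====
-- stated objective: alternative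
-- what changed: Replaces the explicit left-to-right stack scan with a stackless whole-line rewrite: each line is collapsed by repeatedly deleting all adjacent matched pairs '()','[]','{}','<>' via str.replace until a fixpoint, and the first non-opening character of the reduced line (if any) is the illegal one.
import Mathlib
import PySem

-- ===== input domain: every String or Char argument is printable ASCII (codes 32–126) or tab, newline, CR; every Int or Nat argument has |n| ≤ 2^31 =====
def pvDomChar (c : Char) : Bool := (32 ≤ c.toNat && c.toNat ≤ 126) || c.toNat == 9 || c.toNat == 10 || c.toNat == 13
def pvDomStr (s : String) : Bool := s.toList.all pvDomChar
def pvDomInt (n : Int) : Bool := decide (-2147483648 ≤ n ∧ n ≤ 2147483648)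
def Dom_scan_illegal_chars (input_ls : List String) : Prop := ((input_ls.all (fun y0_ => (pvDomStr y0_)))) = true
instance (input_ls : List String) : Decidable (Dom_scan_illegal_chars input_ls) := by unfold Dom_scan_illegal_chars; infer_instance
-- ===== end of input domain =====

-- B collapses each line by deleting adjacent matched pairs to a fixpoint instead of A's stack scan; alternative structure, return value proved identical.

-- ===== PORT A =====
-- inner 'for char in line' loop with break: structural recursion returning the first illegal char (none = loop fell through)
def pvScanLineA (stack : List Char) : List Char → Option Char
  | [] => none
  | c :: rest =>
    let gt := c == '>' && decide (0 < stack.length) && stack.getLast? == some '<'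
    let sq := c == ']' && decide (0 < stack.length) && stack.getLast? == some '['
    let cl := c == '}' && decide (0 < stack.length) && stack.getLast? == some '{'
    let ci := c == ')' && decide (0 < stack.length) && stack.getLast? == some '('
    if gt || sq || cl || ci then pvScanLineA stack.dropLast rest
    else if c == '(' || c == '[' || c == '{' || c == '<' then pvScanLineA (stack ++ [c]) rest
    else some c

def scan_illegal_chars (input_ls : List String) : List String :=
  input_ls.foldl (fun illegal_chars line =>
    match pvScanLineA [] line.toList with
    | some c => illegal_chars ++ [String.mk [c]]
    | none => illegal_chars) []

-- ===== PORT B =====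
-- pvRem: the meaning of PySem.Chars.replace.go with new = [] (needed above the port for collapse's termination proof)
def pvRem (old : List Char) : Nat → List Char → List Char
  | 0, l => l
  | _+1, [] => []
  | fuel+1, c :: t =>
    if old.isPrefixOf (c :: t) then pvRem old fuel (List.drop old.length (c :: t))
    else c :: pvRem old fuel t

theorem pvRem_go (old : List Char) (fuel : Nat) :
    ∀ l acc, PySem.Chars.replace.go old [] fuel l acc = acc.reverse ++ pvRem old fuel l := by
  induction fuel with
  | zero => intro l acc; rw [PySem.Chars.replace.go]; simp [pvRem]
  | succ n ih =>
    intro l acc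
    cases l with
    | nil => rw [PySem.Chars.replace.go]; simp [pvRem]; omega
    | cons c t =>
      rw [PySem.Chars.replace.go]
      by_cases h : old.isPrefixOf (c :: t) <;> simp [h, pvRem, ih]
theorem pvReplace_nil (old s : List Char) (h : old ≠ []) :
    PySem.Chars.replace s old [] = pvRem old s.length s := by
  rw [PySem.Chars.replace]
  simp [h, pvRem_go]
theorem pvRem_length_le (old : List Char) (fuel : Nat) :
    ∀ l, (pvRem old fuel l).length ≤ l.length := by
  induction fuel with
  | zero => intro l; simp [pvRem]
  | succ n ih =>
    intro l
    cases l with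
    | nil => simp [pvRem]
    | cons c t =>
      by_cases h : old.isPrefixOf (c :: t)
      · simp only [pvRem, h, if_pos]
        calc (pvRem old n (List.drop old.length (c :: t))).length
            ≤ (List.drop old.length (c :: t)).length := ih _
          _ ≤ (c :: t).length := by simp
      · simpa [pvRem, h] using ih t
theorem pvRem_no_occ (old : List Char) (fuel : Nat) :
    ∀ l, ¬ (old <:+: l) → pvRem old fuel l = l := by
  induction fuel with
  | zero => intro l _; simp [pvRem]
  | succ n ih =>
    intro l hl
    cases l with
    | nil => simp [pvRem]
    | cons c t =>
      have hpre : ¬ old.isPrefixOf (c :: t) := by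
        intro h
        exact hl ((List.isPrefixOf_iff_prefix.mp h).isInfix)
      have ht : ¬ (old <:+: t) := fun h => hl (h.trans (List.suffix_cons c t).isInfix)
      simp [pvRem, hpre, ih t ht]
theorem pvRem_occ_lt (old : List Char) (hne : old ≠ []) (fuel : Nat) :
    ∀ l, old <:+: l → l.length ≤ fuel → (pvRem old fuel l).length < l.length := by
  induction fuel with
  | zero =>
    intro l hocc hlen
    have : l = [] := List.length_eq_zero_iff.mp (Nat.le_zero.mp hlen)
    subst this
    exact absurd (List.infix_nil.mp hocc) hne
  | succ n ih =>
    intro l hocc hlen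
    cases l with
    | nil => exact absurd (List.infix_nil.mp hocc) hne
    | cons c t =>
      by_cases h : old.isPrefixOf (c :: t)
      · simp only [pvRem, h, if_pos]
        have h1 := pvRem_length_le old n (List.drop old.length (c :: t))
        have h2 : (List.drop old.length (c :: t)).length < (c :: t).length := by
          simp only [List.length_drop]
          have : 0 < old.length := List.length_pos_iff.mpr hne
          have : old.length ≤ (c :: t).length := (List.isPrefixOf_iff_prefix.mp h).length_le
          omega
        omega
      · have ht : old <:+: t := by
          obtain ⟨u, v, huv⟩ := hocc
          cases u with
          | nil => exact absurd (List.isPrefixOf_iff_prefix.mpr ⟨v, huv⟩) h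
          | cons a u' =>
            simp only [List.cons_append] at huv
            exact ⟨u', v, (List.cons.injEq .. ▸ huv).2⟩
        have := ih t ht (by simpa using Nat.lt_succ_iff.mp (by simpa using hlen))
        simp [pvRem, h]
        omega
theorem pvReplace_eq_or_lt (old s : List Char) (h : old ≠ []) :
    PySem.Chars.replace s old [] = s ∨ (PySem.Chars.replace s old []).length < s.length := by
  by_cases hocc : old <:+: s
  · exact Or.inr (by rw [pvReplace_nil old s h]; exact pvRem_occ_lt old h s.length s hocc le_rfl)
  · exact Or.inl (by rw [pvReplace_nil old s h]; exact pvRem_no_occ old s.length s hocc)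

theorem pvFoldRep_eq_or_lt :
    ∀ (ps : List (List Char)) (s : List Char), (∀ p ∈ ps, p ≠ []) →
      (ps.foldl (fun t p => PySem.Chars.replace t p []) s = s ∨
       (ps.foldl (fun t p => PySem.Chars.replace t p []) s).length < s.length) := by
  intro ps
  induction ps with
  | nil => intro s _; exact Or.inl rfl
  | cons p ps ih =>
    intro s hps
    have hp : p ≠ [] := hps p (List.mem_cons_self ..)
    have hps' : ∀ q ∈ ps, q ≠ [] := fun q hq => hps q (List.mem_cons_of_mem p hq)
    simp only [List.foldl_cons]
    rcases pvReplace_eq_or_lt p s hp with h | h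
    · rw [h]; exact ih s hps'
    · rcases ih (PySem.Chars.replace s p []) hps' with h' | h'
      · rw [h']; exact Or.inr h
      · exact Or.inr (h'.trans h)

def pvPairs : List (List Char) := [['(',')'], ['[',']'], ['{','}'], ['<','>']]

-- one body of the while-loop: the four replaces
def pvCollapseStep (s : List Char) : List Char :=
  pvPairs.foldl (fun t p => PySem.Chars.replace t p []) s

theorem pvCollapseStep_lt (s : List Char) (h : ¬ pvCollapseStep s = s) :
    (pvCollapseStep s).length < s.length := by
  have := pvFoldRep_eq_or_lt pvPairs s (by intro p hp; simp [pvPairs] at hp; rcases hp with h|h|h|h <;> simp [h])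
  rcases this with h' | h'
  · exact absurd h' h
  · exact h'

-- the while-loop: collapse to a fixpoint
def pvCollapse (s : List Char) : List Char :=
  if h : pvCollapseStep s = s then s else pvCollapse (pvCollapseStep s)
termination_by s.length
decreasing_by exact pvCollapseStep_lt s h

-- 'char not in "([{<"'
def pvIsOpener (c : Char) : Bool := c == '(' || c == '[' || c == '{' || c == '<'

-- the 'for char in reduced' loop with break
def pvFirstIllegal (s : List Char) : Option Char := s.find? (fun c => !pvIsOpener c)

def scan_illegal_chars_alt (input_ls : List String) : List String :=
  input_ls.foldl (fun illegal_chars line =>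
    match pvFirstIllegal (pvCollapse line.toList) with
    | some c => illegal_chars ++ [String.mk [c]]
    | none => illegal_chars) []

-- ===== PRECONDITION & SPEC =====
def Spec_scan_illegal_chars (input_ls : List String) (out : List String) : Prop := out = scan_illegal_chars_alt input_ls
instance (input_ls : List String) (out : List String) : Decidable (Spec_scan_illegal_chars input_ls out) := by unfold Spec_scan_illegal_chars; infer_instance

-- ===== CLAIM (what is proved, stated in full; the proofs are below) =====
def Claim_equal_scan_illegal_chars : Prop := ∀ (input_ls : List String), Dom_scan_illegal_chars input_ls → Spec_scan_illegal_chars input_ls (scan_illegal_chars input_ls)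

-- ===== LEMMAS AND PROOFS =====

theorem pvReplace_length_le (old s : List Char) (h : old ≠ []) :
    (PySem.Chars.replace s old []).length ≤ s.length := by
  rw [pvReplace_nil old s h]; exact pvRem_length_le old s.length s


-- the canonical one-char reduction step: cancel a closer against a matching opener on top, else append
def pvMtch (st : List Char) (c : Char) : Bool :=
  (c == '>' && st.getLast? == some '<') || (c == ']' && st.getLast? == some '[') ||
  (c == '}' && st.getLast? == some '{') || (c == ')' && st.getLast? == some '(')

def pvStp (st : List Char) (c : Char) : List Char :=
  if pvMtch st c then st.dropLast else st ++ [c]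

theorem pvFoldStp_pair (p : List Char) (hp : p ∈ pvPairs) (st : List Char) :
    List.foldl pvStp st p = st := by
  simp only [pvPairs, List.mem_cons, List.not_mem_nil, or_false] at hp
  rcases hp with h | h | h | h <;> subst h <;>
    simp [List.foldl, pvStp, pvMtch, List.getLast?_concat]

theorem pvFoldStp_pvRem (p : List Char) (hp : p ∈ pvPairs) (fuel : Nat) :
    ∀ l st, List.foldl pvStp st (pvRem p fuel l) = List.foldl pvStp st l := by
  induction fuel with
  | zero => intro l st; simp [pvRem]
  | succ n ih =>
    intro l st
    cases l with
    | nil => simp [pvRem]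
    | cons c t =>
      by_cases h : p.isPrefixOf (c :: t)
      · obtain ⟨rest, hrest⟩ := List.isPrefixOf_iff_prefix.mp h
        simp only [pvRem, h, if_pos]
        rw [← hrest, List.drop_left, ih rest st, List.foldl_append, pvFoldStp_pair p hp st]
      · simp only [pvRem, h, if_neg, Bool.false_eq_true, not_false_eq_true, List.foldl_cons]
        exact ih t (pvStp st c)

theorem pvFoldStp_replace (p : List Char) (hp : p ∈ pvPairs) (l st : List Char) :
    List.foldl pvStp st (PySem.Chars.replace l p []) = List.foldl pvStp st l := by
  have hp' : p ≠ [] := by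
    simp only [pvPairs, List.mem_cons, List.not_mem_nil, or_false] at hp
    rcases hp with h | h | h | h <;> simp [h]
  rw [pvReplace_nil p l hp']
  exact pvFoldStp_pvRem p hp l.length l st

theorem pvFoldStp_collapseStep (s st : List Char) :
    List.foldl pvStp st (pvCollapseStep s) = List.foldl pvStp st s := by
  show List.foldl pvStp st (List.foldl (fun t p => PySem.Chars.replace t p []) s pvPairs) = _
  simp only [pvPairs, List.foldl_cons, List.foldl_nil]
  rw [pvFoldStp_replace ['<','>'] (by simp [pvPairs]),
      pvFoldStp_replace ['{','}'] (by simp [pvPairs]),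
      pvFoldStp_replace ['[',']'] (by simp [pvPairs]),
      pvFoldStp_replace ['(',')'] (by simp [pvPairs])]

theorem pvFoldStp_collapse (s st : List Char) :
    List.foldl pvStp st (pvCollapse s) = List.foldl pvStp st s := by
  fun_induction pvCollapse s with
  | case1 s h => rfl
  | case2 s h ih => rw [ih, pvFoldStp_collapseStep]

theorem pvCollapse_fix (s : List Char) : pvCollapseStep (pvCollapse s) = pvCollapse s := by
  fun_induction pvCollapse s with
  | case1 s h => exact h
  | case2 s h ih => exact ih

theorem pvFoldRep_fix :
    ∀ (ps : List (List Char)) (s : List Char), (∀ p ∈ ps, p ≠ []) →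
      ps.foldl (fun t p => PySem.Chars.replace t p []) s = s → ∀ p ∈ ps, ¬ p <:+: s := by
  intro ps
  induction ps with
  | nil => intro s _ _ p hp; exact absurd hp (List.not_mem_nil)
  | cons p ps ih =>
    intro s hps hfold
    have hp : p ≠ [] := hps p (List.mem_cons_self ..)
    have hps2 : ∀ q ∈ ps, q ≠ [] := fun q hq => hps q (List.mem_cons_of_mem p hq)
    simp only [List.foldl_cons] at hfold
    have hle1 : (ps.foldl (fun t p => PySem.Chars.replace t p []) (PySem.Chars.replace s p [])).length
        ≤ (PySem.Chars.replace s p []).length := by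
      rcases pvFoldRep_eq_or_lt ps (PySem.Chars.replace s p []) hps2 with h | h
      · rw [h]
      · exact le_of_lt h
    have hle2 : (PySem.Chars.replace s p []).length ≤ s.length := pvReplace_length_le p s hp
    have heq : PySem.Chars.replace s p [] = s := by
      rcases pvReplace_eq_or_lt p s hp with h | h
      · exact h
      · rw [hfold] at hle1; omega
    rw [heq] at hfold
    intro q hq
    rcases List.mem_cons.mp hq with rfl | hq2
    · intro hocc
      have := pvRem_occ_lt q hp s.length s hocc le_rfl
      rw [← pvReplace_nil q s hp, heq] at this
      omega
    · exact ih s hps2 hfold q hq2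

theorem pvCollapse_no_pair (s : List Char) : ∀ p ∈ pvPairs, ¬ p <:+: pvCollapse s := by
  refine pvFoldRep_fix pvPairs (pvCollapse s) ?_ (pvCollapse_fix s)
  intro p hp
  simp only [pvPairs, List.mem_cons, List.not_mem_nil, or_false] at hp
  rcases hp with h | h | h | h <;> simp [h]

theorem pvFoldStp_noPair :
    ∀ (F st : List Char), (∀ p ∈ pvPairs, ¬ p <:+: (st ++ F)) → F.foldl pvStp st = st ++ F := by
  intro F
  induction F with
  | nil => intro st _; simp
  | cons c t ih =>
    intro st h
    have hm : pvMtch st c = false := by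
      by_cases hm : pvMtch st c = true
      · exfalso
        simp only [pvMtch, Bool.or_eq_true, Bool.and_eq_true, beq_iff_eq, or_assoc] at hm
        rcases hm with ⟨rfl, hg⟩ | ⟨rfl, hg⟩ | ⟨rfl, hg⟩ | ⟨rfl, hg⟩
        · obtain ⟨st2, rfl⟩ := List.getLast?_eq_some_iff.mp hg
          exact h ['<', '>'] (by simp [pvPairs]) ⟨st2, t, by simp⟩
        · obtain ⟨st2, rfl⟩ := List.getLast?_eq_some_iff.mp hg
          exact h ['[', ']'] (by simp [pvPairs]) ⟨st2, t, by simp⟩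
        · obtain ⟨st2, rfl⟩ := List.getLast?_eq_some_iff.mp hg
          exact h ['{', '}'] (by simp [pvPairs]) ⟨st2, t, by simp⟩
        · obtain ⟨st2, rfl⟩ := List.getLast?_eq_some_iff.mp hg
          exact h ['(', ')'] (by simp [pvPairs]) ⟨st2, t, by simp⟩
      · exact eq_false_of_ne_true hm
    simp only [List.foldl_cons, pvStp, hm, Bool.false_eq_true, if_neg, not_false_eq_true]
    rw [show st ++ c :: t = (st ++ [c]) ++ t by simp] at h ⊢
    exact ih (st ++ [c]) h

theorem pvStp_keep :
    ∀ (rest pre : List Char) (c : Char) (post : List Char), pvIsOpener c = false →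
      ∃ post', List.foldl pvStp (pre ++ c :: post) rest = pre ++ c :: post' := by
  intro rest
  induction rest with
  | nil => intro pre c post _; exact ⟨post, rfl⟩
  | cons d rest ih =>
    intro pre c post hco
    simp only [List.foldl_cons]
    obtain ⟨post1, h1⟩ : ∃ p1, pvStp (pre ++ c :: post) d = pre ++ c :: p1 := by
      by_cases hm : pvMtch (pre ++ c :: post) d = true
      · rcases List.eq_nil_or_concat post with rfl | ⟨q, x, rfl⟩
        · exfalso
          simp only [pvMtch, List.getLast?_concat, Bool.or_eq_true, Bool.and_eq_true,
            beq_iff_eq, Option.some.injEq, or_assoc] at hm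
          rcases hm with ⟨_, rfl⟩ | ⟨_, rfl⟩ | ⟨_, rfl⟩ | ⟨_, rfl⟩ <;> simp [pvIsOpener] at hco
        · refine ⟨q, ?_⟩
          rw [pvStp, if_pos hm, show pre ++ c :: q.concat x = (pre ++ c :: q) ++ [x] by simp,
            List.dropLast_concat]
      · refine ⟨post ++ [d], ?_⟩
        rw [pvStp, if_neg hm]
        simp
    rw [h1]
    exact ih pre c post1 hco

theorem pvCond_eq (st : List Char) (c : Char) :
    (c == '>' && decide (0 < st.length) && st.getLast? == some '<' ||
     (c == ']' && decide (0 < st.length) && st.getLast? == some '[') ||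
     (c == '}' && decide (0 < st.length) && st.getLast? == some '{') ||
     (c == ')' && decide (0 < st.length) && st.getLast? == some '(')) = pvMtch st c := by
  cases st with
  | nil => simp [pvMtch]
  | cons a l => simp [pvMtch]

theorem pvScanA_char :
    ∀ (cs st : List Char), st.all pvIsOpener = true →
      pvScanLineA st cs = pvFirstIllegal (List.foldl pvStp st cs) := by
  intro cs
  induction cs with
  | nil =>
    intro st hst
    simp only [pvScanLineA, List.foldl_nil, pvFirstIllegal]
    symm
    rw [List.find?_eq_none]
    intro x hx
    have := List.all_eq_true.mp hst x hx
    simp [this]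
  | cons c rest ih =>
    intro st hst
    simp only [pvScanLineA]
    rw [pvCond_eq st c]
    by_cases hm : pvMtch st c = true
    · rw [if_pos hm]
      have hsub : st.dropLast.all pvIsOpener = true :=
        List.all_eq_true.mpr fun x hx => List.all_eq_true.mp hst x (List.mem_of_mem_dropLast hx)
      rw [ih st.dropLast hsub]
      simp only [List.foldl_cons, pvStp, hm, if_pos]
    · rw [if_neg (by simp [hm])]
      by_cases ho : (c == '(' || c == '[' || c == '{' || c == '<') = true
      · rw [if_pos ho]
        have hall : (st ++ [c]).all pvIsOpener = true := by
          rw [List.all_append]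
          simp only [hst, Bool.true_and, List.all_cons, List.all_nil, Bool.and_true]
          exact ho
        rw [ih (st ++ [c]) hall]
        simp only [List.foldl_cons, pvStp, eq_false_of_ne_true hm, Bool.false_eq_true, if_neg,
          not_false_eq_true]
      · rw [if_neg (by simp [ho])]
        have hstep : List.foldl pvStp st (c :: rest) = List.foldl pvStp (st ++ c :: []) rest := by
          simp only [List.foldl_cons, pvStp, eq_false_of_ne_true hm, Bool.false_eq_true, if_neg,
            not_false_eq_true]
        rw [hstep]
        obtain ⟨post2, hpost⟩ := pvStp_keep rest st c [] (eq_false_of_ne_true ho)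
        rw [hpost]
        simp only [pvFirstIllegal]
        rw [List.find?_append]
        have h1 : st.find? (fun c => !pvIsOpener c) = none := by
          rw [List.find?_eq_none]
          intro x hx
          have := List.all_eq_true.mp hst x hx
          simp [this]
        rw [h1]
        have h4 := eq_false_of_ne_true ho
        simp only [Bool.or_eq_false_iff] at h4
        obtain ⟨⟨⟨h5, h6⟩, h7⟩, h8⟩ := h4
        simp [pvIsOpener, h5, h6, h7, h8]

theorem pvLine_eq (cs : List Char) :
    pvScanLineA [] cs = pvFirstIllegal (pvCollapse cs) := by
  rw [pvScanA_char cs [] rfl, ← pvFoldStp_collapse cs [],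
    pvFoldStp_noPair (pvCollapse cs) [] (by simpa using pvCollapse_no_pair cs)]
  simp

-- ===== VERDICT (by name: the statement is the Claim_ definition above) =====
theorem scan_illegal_chars_spec : Claim_equal_scan_illegal_chars := by
  intro input_ls _
  unfold Spec_scan_illegal_chars scan_illegal_chars scan_illegal_chars_alt
  induction input_ls using List.reverseRecOn with
  | nil => rfl
  | append_singleton xs x ih => simp only [List.foldl_append, List.foldl_cons, List.foldl_nil, pvLine_eq]
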